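-- pv_equiv track=rewrite | github.com/shiqi9717-glitch/Graduation | scripts/build_local_probe_recheck_audit.py | _pick_controls
-- ===== SOURCE A (Python) =====
-- def _pick_controls(flip_rows: list[dict], control_rows: list[dict], controls_per_flip: int) -> list[dict]:
--     used_ids: set[str] = set()
--     selected: list[dict] = []
--     for flip in flip_rows:
--         flip_sample_type = str(flip.get("sample_type") or "")
--         flip_condition_id = str(flip.get("condition_id") or "")
--
--         exact = [
--             row for row in control_rows
--             if str(row.get("sample_id")) not in used_ids
--             and str(row.get("sample_type") or "") == flip_sample_type
--             and str(row.get("condition_id") or "") == flip_condition_id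
--         ]
--         relaxed = [
--             row for row in control_rows
--             if str(row.get("sample_id")) not in used_ids
--             and str(row.get("sample_type") or "") == flip_sample_type
--         ]
--         fallback = [row for row in control_rows if str(row.get("sample_id")) not in used_ids]
--         pool = exact or relaxed or fallback
--         for row in pool[: max(int(controls_per_flip), 0)]:
--             used_ids.add(str(row.get("sample_id")))
--             selected.append(
--                 {
--                     **row,
--                     "audit_group": "matched_nonflip_control",
--                     "matched_to_sample_id": str(flip.get("sample_id")),
--                 }
--             )
--     return selected
-- ===== SOURCE B (Python) =====
-- def _pick_controls(flip_rows: list[dict], control_rows: list[dict], controls_per_flip: int) -> list[dict]: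
--     k = max(int(controls_per_flip), 0)
--     by_tc: dict = {}
--     by_t: dict = {}
--     for row in control_rows:
--         t = str(row.get("sample_type") or "")
--         c = str(row.get("condition_id") or "")
--         by_tc.setdefault((t, c), []).append(row)
--         by_t.setdefault(t, []).append(row)
--     rest = list(control_rows)
--     used: set = set()
--     selected: list = []
--     for flip in flip_rows:
--         t = str(flip.get("sample_type") or "")
--         c = str(flip.get("condition_id") or "")
--         # compact each consulted bucket in place: rows whose id is already used are
--         # dropped for good and never rescanned by a later flip
--         e = [r for r in by_tc.get((t, c), ()) if str(r.get("sample_id")) not in used]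
--         by_tc[(t, c)] = e
--         if e:
--             pool = e
--         else:
--             rl = [r for r in by_t.get(t, ()) if str(r.get("sample_id")) not in used]
--             by_t[t] = rl
--             if rl:
--                 pool = rl
--             else:
--                 rest = [r for r in rest if str(r.get("sample_id")) not in used]
--                 pool = rest
--         for row in pool[:k]:
--             used.add(str(row.get("sample_id")))
--             selected.append({**row,
--                              "audit_group": "matched_nonflip_control",
--                              "matched_to_sample_id": str(flip.get("sample_id"))})
--     return selected
-- ===== Notes on version B (the rewrite author's own statement) =====
-- stated objective: faster
-- what changed: B pre-indexes the controls once into ordered buckets keyed by (sample_type, condition_id) and by sample_type, keeps a compacted fallback list, and compacts each consulted pool in place so rows already used are dropped permanently instead of being re-scanned three times per flip.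
import Mathlib
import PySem

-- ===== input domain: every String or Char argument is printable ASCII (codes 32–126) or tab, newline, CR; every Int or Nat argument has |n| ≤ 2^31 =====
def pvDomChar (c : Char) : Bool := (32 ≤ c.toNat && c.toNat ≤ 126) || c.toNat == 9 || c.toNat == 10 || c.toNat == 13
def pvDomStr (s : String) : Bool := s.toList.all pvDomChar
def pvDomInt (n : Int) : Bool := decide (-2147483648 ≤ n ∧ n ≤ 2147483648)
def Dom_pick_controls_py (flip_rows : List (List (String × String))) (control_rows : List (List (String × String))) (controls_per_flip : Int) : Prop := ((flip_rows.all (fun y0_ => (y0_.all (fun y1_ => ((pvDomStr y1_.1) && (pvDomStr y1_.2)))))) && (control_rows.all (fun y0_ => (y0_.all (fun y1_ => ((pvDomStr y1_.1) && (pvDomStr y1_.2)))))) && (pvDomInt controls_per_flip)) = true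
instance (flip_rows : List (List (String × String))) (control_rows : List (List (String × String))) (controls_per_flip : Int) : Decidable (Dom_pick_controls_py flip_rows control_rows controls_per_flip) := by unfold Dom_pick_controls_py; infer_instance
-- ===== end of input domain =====

-- B pre-indexes the controls into ordered buckets keyed by (sample_type, condition_id) and by
-- sample_type and compacts each consulted pool in place (used rows are dropped for good), so it
-- avoids A's three full control scans per flip; return values are proved identical.

-- ===== PORT A =====
-- str(row.get("sample_id")): the value if present, Python's "None" rendering otherwise (exact:
-- values are strings, and str of a string is itself).
def pvSid (r : PySem.Dict String String) : String :=
  match r.get? "sample_id" with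
  | some v => v
  | none => "None"

-- str(row.get(k) or ""): "" when the key is absent or its value is the (only falsy) empty string;
-- otherwise the stored string — which is exactly getD r k "".
def pvGetOr (r : PySem.Dict String String) (k : String) : String :=
  (r.get? k).getD ""

-- the (identical) body of the inner `for row in pool[:…]` loop of both Pythons:
-- used_ids.add(…); selected.append({**row, "audit_group": …, "matched_to_sample_id": …})
def pvSelectStep (flip : PySem.Dict String String)
    (st : PySem.Set String × List (List (String × String)))
    (r : PySem.Dict String String) :
    PySem.Set String × List (List (String × String)) :=
  (PySem.Set.add st.1 (pvSid r),
   st.2 ++ [((r.insert "audit_group" "matched_nonflip_control").insert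
              "matched_to_sample_id" (pvSid flip)).items])

def pick_controls_py (flip_rows : List (List (String × String))) (control_rows : List (List (String × String))) (controls_per_flip : Int) : List (List (String × String)) :=
  -- rows arrive as Python dicts: assoc lists cross the boundary via Dict.ofList in both ports
  let cds := control_rows.map PySem.Dict.ofList
  ((flip_rows.map PySem.Dict.ofList).foldl
    (fun (st : PySem.Set String × List (List (String × String))) flip =>
      let ft := pvGetOr flip "sample_type"
      let fc := pvGetOr flip "condition_id"
      let exact := cds.filter (fun r =>
        !(PySem.Set.contains st.1 (pvSid r)) && (pvGetOr r "sample_type" == ft)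
          && (pvGetOr r "condition_id" == fc))
      let relaxed := cds.filter (fun r =>
        !(PySem.Set.contains st.1 (pvSid r)) && (pvGetOr r "sample_type" == ft))
      let fallback := cds.filter (fun r => !(PySem.Set.contains st.1 (pvSid r)))
      let pool := if exact.isEmpty then (if relaxed.isEmpty then fallback else relaxed) else exact
      (pool.take (max controls_per_flip 0).toNat).foldl (pvSelectStep flip) st)
    (PySem.Set.empty, [])).2

-- ===== PORT B =====
-- the bucket-compaction step `[r for r in rows if str(r.get("sample_id")) not in used]`
def pvLive (u : PySem.Set String) (rows : List (PySem.Dict String String)) :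
    List (PySem.Dict String String) :=
  rows.filter (fun r => !(PySem.Set.contains u (pvSid r)))

def pvKeyTC (r : PySem.Dict String String) : String × String :=
  (pvGetOr r "sample_type", pvGetOr r "condition_id")

def pvKeyT (r : PySem.Dict String String) : String :=
  pvGetOr r "sample_type"

def pick_controls_py_alt (flip_rows : List (List (String × String))) (control_rows : List (List (String × String))) (controls_per_flip : Int) : List (List (String × String)) :=
  let k := (max controls_per_flip 0).toNat
  let cds := control_rows.map PySem.Dict.ofList
  -- one pass over the controls building both buckets (setdefault(key, []).append(row))
  let idx := cds.foldl
    (fun (p : PySem.Dict (String × String) (List (PySem.Dict String String)) ×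
              PySem.Dict String (List (PySem.Dict String String))) r =>
      (p.1.modify (pvKeyTC r) [] (· ++ [r]), p.2.modify (pvKeyT r) [] (· ++ [r])))
    (PySem.Dict.empty, PySem.Dict.empty)
  ((flip_rows.map PySem.Dict.ofList).foldl
    (fun st flip =>
      match st with
      | (byTC, byT, rest, used, selected) =>
        let ft := pvGetOr flip "sample_type"
        let fc := pvGetOr flip "condition_id"
        let e := pvLive used (byTC.getD (ft, fc) [])
        let byTC' := byTC.insert (ft, fc) e
        if e.isEmpty then
          let rl := pvLive used (byT.getD ft [])
          let byT' := byT.insert ft rl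
          if rl.isEmpty then
            let rest' := pvLive used rest
            let us := (rest'.take k).foldl (pvSelectStep flip) (used, selected)
            (byTC', byT', rest', us.1, us.2)
          else
            let us := (rl.take k).foldl (pvSelectStep flip) (used, selected)
            (byTC', byT', rest, us.1, us.2)
        else
          let us := (e.take k).foldl (pvSelectStep flip) (used, selected)
          (byTC', byT, rest, us.1, us.2))
    (idx.1, idx.2, cds, PySem.Set.empty, [])).2.2.2.2

-- ===== PRECONDITION & SPEC =====
def Spec_pick_controls_py (flip_rows : List (List (String × String))) (control_rows : List (List (String × String))) (controls_per_flip : Int) (out : List (List (String × String))) : Prop := out = pick_controls_py_alt flip_rows control_rows controls_per_flip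
instance (flip_rows : List (List (String × String))) (control_rows : List (List (String × String))) (controls_per_flip : Int) (out : List (List (String × String))) : Decidable (Spec_pick_controls_py flip_rows control_rows controls_per_flip out) := by unfold Spec_pick_controls_py; infer_instance

-- ===== CLAIM (what is proved, stated in full; the proofs are below) =====
def Claim_equal_pick_controls_py : Prop := ∀ (flip_rows : List (List (String × String))) (control_rows : List (List (String × String))) (controls_per_flip : Int), Dom_pick_controls_py flip_rows control_rows controls_per_flip → Spec_pick_controls_py flip_rows control_rows controls_per_flip (pick_controls_py flip_rows control_rows controls_per_flip)

-- ===== LEMMAS AND PROOFS =====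

-- A's and B's per-flip loop bodies, named (definitionally the lambdas inside the two ports)
def pvA (cds : List (PySem.Dict String String)) (k : Nat)
    (st : PySem.Set String × List (List (String × String)))
    (flip : PySem.Dict String String) :
    PySem.Set String × List (List (String × String)) :=
  let ft := pvGetOr flip "sample_type"
  let fc := pvGetOr flip "condition_id"
  let exact := cds.filter (fun r =>
    !(PySem.Set.contains st.1 (pvSid r)) && (pvGetOr r "sample_type" == ft)
      && (pvGetOr r "condition_id" == fc))
  let relaxed := cds.filter (fun r =>
    !(PySem.Set.contains st.1 (pvSid r)) && (pvGetOr r "sample_type" == ft))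
  let fallback := cds.filter (fun r => !(PySem.Set.contains st.1 (pvSid r)))
  let pool := if exact.isEmpty then (if relaxed.isEmpty then fallback else relaxed) else exact
  (pool.take k).foldl (pvSelectStep flip) st

def pvStB : Type :=
  PySem.Dict (String × String) (List (PySem.Dict String String)) ×
  PySem.Dict String (List (PySem.Dict String String)) ×
  List (PySem.Dict String String) × PySem.Set String × List (List (String × String))

def pvB (cds : List (PySem.Dict String String)) (k : Nat)
    (st : pvStB) (flip : PySem.Dict String String) : pvStB :=
  match st with
  | (byTC, byT, rest, used, selected) =>
    let ft := pvGetOr flip "sample_type"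
    let fc := pvGetOr flip "condition_id"
    let e := pvLive used (byTC.getD (ft, fc) [])
    let byTC' := byTC.insert (ft, fc) e
    if e.isEmpty then
      let rl := pvLive used (byT.getD ft [])
      let byT' := byT.insert ft rl
      if rl.isEmpty then
        let rest' := pvLive used rest
        let us := (rest'.take k).foldl (pvSelectStep flip) (used, selected)
        (byTC', byT', rest', us.1, us.2)
      else
        let us := (rl.take k).foldl (pvSelectStep flip) (used, selected)
        (byTC', byT', rest, us.1, us.2)
    else
      let us := (e.take k).foldl (pvSelectStep flip) (used, selected)
      (byTC', byT, rest, us.1, us.2)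

-- a fold producing a pair componentwise is the pair of folds
theorem pv_pair_foldl {α β γ : Type} (f : α → γ → α) (g : β → γ → β) (l : List γ) (a : α) (b : β) :
    l.foldl (fun p r => (f p.1 r, g p.2 r)) (a, b) = (l.foldl f a, l.foldl g b) := by
  induction l generalizing a b with
  | nil => rfl
  | cons x xs ih => simp only [List.foldl_cons]; exact ih (f a x) (g b x)

-- the product BEq instance, componentwise (definitional)
theorem pv_prod_beq {α β : Type} [BEq α] [BEq β] (a c : α) (b d : β) :
    ((a, b) == (c, d)) = (a == c && b == d) := rfl

-- looking a key up in the bucket index built by folding `setdefault(key,[]).append(row)`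
-- yields exactly the rows with that key, in their original order
theorem pv_getD_groupFold {κ : Type} [BEq κ] [LawfulBEq κ]
    (kf : PySem.Dict String String → κ)
    (rows : List (PySem.Dict String String))
    (d : PySem.Dict κ (List (PySem.Dict String String))) (key : κ) :
    (rows.foldl (fun d r => d.modify (kf r) [] (· ++ [r])) d).getD key [] =
      d.getD key [] ++ rows.filter (fun r => kf r == key) := by
  induction rows generalizing d with
  | nil => simp
  | cons r rows ih =>
    simp only [List.foldl_cons, List.filter_cons]
    by_cases h : kf r = key
    · subst h
      rw [ih, PySem.Dict.getD_modify_self]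
      simp
    · rw [ih, PySem.Dict.getD_modify_of_ne _ _ _ (Ne.symm h)]
      simp [h]

-- filtering with a stronger predicate absorbs a previous weaker filter
theorem pv_filter_filter_imp {α : Type} (p q : α → Bool)
    (h : ∀ a, p a = true → q a = true) (xs : List α) :
    (xs.filter q).filter p = xs.filter p := by
  induction xs with
  | nil => rfl
  | cons x xs ih =>
    by_cases hq : q x = true
    · by_cases hp : p x = true <;> simp [hq, hp, ih]
    · have hp : p x = false := by
        cases hpx : p x with
        | false => rfl
        | true => exact absurd (h x hpx) hq
      simp [hq, hp, ih]

-- the live filter for a larger used-set absorbs the one for a smaller used-set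
theorem pv_live_mono (u u' : PySem.Set String) (h : ∀ x, x ∈ (u : List String) → x ∈ (u' : List String))
    (rows : List (PySem.Dict String String)) :
    pvLive u' (pvLive u rows) = pvLive u' rows := by
  unfold pvLive
  refine pv_filter_filter_imp _ _ ?_ rows
  intro r hr
  simp only [PySem.Set.contains, Bool.not_eq_true', List.contains_eq_mem,
    decide_eq_false_iff_not] at hr ⊢
  exact fun hm => hr (h _ hm)

-- a compaction invariant survives growth of the used-set
theorem pv_inv_mono (u u' : PySem.Set String) (h : ∀ x, x ∈ (u : List String) → x ∈ (u' : List String))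
    (bucket target : List (PySem.Dict String String))
    (hb : pvLive u bucket = pvLive u target) :
    pvLive u' bucket = pvLive u' target := by
  rw [← pv_live_mono u u' h bucket, hb, pv_live_mono u u' h target]

-- the inner selection loop only ever adds to the used-set
theorem pv_used_fold_mono (flip : PySem.Dict String String)
    (pool : List (PySem.Dict String String))
    (u : PySem.Set String) (s : List (List (String × String))) :
    ∀ x, x ∈ (u : List String) → x ∈ ((pool.foldl (pvSelectStep flip) (u, s)).1 : List String) := by
  induction pool generalizing u s with
  | nil => intro x hx; exact hx
  | cons r rs ih =>
    intro x hx
    refine ih _ _ x ?_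
    exact (PySem.Set.mem_add _ _ _).mpr (Or.inl hx)

-- the live filter of a (type, condition) group is A's `exact` comprehension
theorem pv_liveTC (cds : List (PySem.Dict String String)) (u : PySem.Set String) (ft fc : String) :
    pvLive u (cds.filter (fun r => pvKeyTC r == (ft, fc))) =
      cds.filter (fun r =>
        !(PySem.Set.contains u (pvSid r)) && (pvGetOr r "sample_type" == ft)
          && (pvGetOr r "condition_id" == fc)) := by
  unfold pvLive pvKeyTC
  rw [List.filter_filter]
  refine List.filter_congr ?_
  intro r _
  by_cases h1 : pvSid r ∈ (u : List String) <;>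
  by_cases h2 : pvGetOr r "sample_type" = ft <;>
  by_cases h3 : pvGetOr r "condition_id" = fc <;>
    simp [h1, h2, h3, PySem.Set.contains, pv_prod_beq]

-- the live filter of a type group is A's `relaxed` comprehension
theorem pv_liveT (cds : List (PySem.Dict String String)) (u : PySem.Set String) (ft : String) :
    pvLive u (cds.filter (fun r => pvKeyT r == ft)) =
      cds.filter (fun r =>
        !(PySem.Set.contains u (pvSid r)) && (pvGetOr r "sample_type" == ft)) := by
  unfold pvLive pvKeyT
  rw [List.filter_filter]

-- MAIN INVARIANT: as long as each bucket, filtered by the current used-set, equals the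
-- correspondingly filtered full group, B's fold carries exactly A's (used, selected) state
theorem pv_main (cds : List (PySem.Dict String String)) (k : Nat)
    (flips : List (PySem.Dict String String)) :
    ∀ (byTC : PySem.Dict (String × String) (List (PySem.Dict String String)))
      (byT : PySem.Dict String (List (PySem.Dict String String)))
      (rest : List (PySem.Dict String String))
      (u : PySem.Set String) (s : List (List (String × String))),
      (∀ key, pvLive u (byTC.getD key []) = pvLive u (cds.filter (fun r => pvKeyTC r == key))) →
      (∀ t, pvLive u (byT.getD t []) = pvLive u (cds.filter (fun r => pvKeyT r == t))) →
      pvLive u rest = pvLive u cds →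
      (flips.foldl (pvB cds k) (byTC, byT, rest, u, s)).2.2.2 =
        flips.foldl (pvA cds k) (u, s) := by
  induction flips with
  | nil => intro byTC byT rest u s _ _ _; rfl
  | cons flip fs ih =>
    intro byTC byT rest u s hTC hT hR
    simp only [List.foldl_cons]
    have he : pvLive u (byTC.getD (pvGetOr flip "sample_type", pvGetOr flip "condition_id") []) =
        cds.filter (fun r =>
          !(PySem.Set.contains u (pvSid r))
            && (pvGetOr r "sample_type" == pvGetOr flip "sample_type")
            && (pvGetOr r "condition_id" == pvGetOr flip "condition_id")) := by
      rw [hTC, pv_liveTC]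
    have hrl : pvLive u (byT.getD (pvGetOr flip "sample_type") []) =
        cds.filter (fun r =>
          !(PySem.Set.contains u (pvSid r))
            && (pvGetOr r "sample_type" == pvGetOr flip "sample_type")) := by
      rw [hT, pv_liveT]
    have hfb : pvLive u rest = cds.filter (fun r => !(PySem.Set.contains u (pvSid r))) := hR
    -- name A's pool and the joint inner fold
    simp only [pvB, pvA, he, hrl, hfb]
    set exact := cds.filter (fun r =>
      !(PySem.Set.contains u (pvSid r))
        && (pvGetOr r "sample_type" == pvGetOr flip "sample_type")
        && (pvGetOr r "condition_id" == pvGetOr flip "condition_id")) with hexact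
    set relaxed := cds.filter (fun r =>
      !(PySem.Set.contains u (pvSid r))
        && (pvGetOr r "sample_type" == pvGetOr flip "sample_type")) with hrelaxed
    set fallback := cds.filter (fun r => !(PySem.Set.contains u (pvSid r))) with hfallback
    by_cases hE : exact.isEmpty
    · by_cases hRl : relaxed.isEmpty
      · simp only [hE, hRl, if_true]
        set us := ((fallback.take k).foldl (pvSelectStep flip) (u, s)) with hus
        have hmono : ∀ x, x ∈ (u : List String) → x ∈ (us.1 : List String) :=
          pv_used_fold_mono flip _ u s
        refine ih _ _ _ _ _ ?_ ?_ ?_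
        · intro key
          by_cases hk : key = (pvGetOr flip "sample_type", pvGetOr flip "condition_id")
          · subst hk
            rw [PySem.Dict.getD_insert_self]
            have h1 : pvLive us.1 exact = pvLive us.1 (byTC.getD (pvGetOr flip "sample_type", pvGetOr flip "condition_id") []) := by
              rw [← he]; exact pv_live_mono u us.1 hmono _
            rw [h1]
            exact pv_inv_mono u us.1 hmono _ _ (hTC _)
          · rw [PySem.Dict.getD_insert_of_ne _ _ _ hk]
            exact pv_inv_mono u us.1 hmono _ _ (hTC _)
        · intro t
          by_cases hk : t = pvGetOr flip "sample_type"
          · subst hk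
            rw [PySem.Dict.getD_insert_self]
            have h1 : pvLive us.1 relaxed = pvLive us.1 (byT.getD (pvGetOr flip "sample_type") []) := by
              rw [← hrl]; exact pv_live_mono u us.1 hmono _
            rw [h1]
            exact pv_inv_mono u us.1 hmono _ _ (hT _)
          · rw [PySem.Dict.getD_insert_of_ne _ _ _ hk]
            exact pv_inv_mono u us.1 hmono _ _ (hT _)
        · have h1 : pvLive us.1 fallback = pvLive us.1 rest := by
            rw [← hfb]; exact pv_live_mono u us.1 hmono _
          rw [h1]
          exact pv_inv_mono u us.1 hmono _ _ hR
      · simp only [hE, hRl, if_true]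
        set us := ((relaxed.take k).foldl (pvSelectStep flip) (u, s)) with hus
        have hmono : ∀ x, x ∈ (u : List String) → x ∈ (us.1 : List String) :=
          pv_used_fold_mono flip _ u s
        refine ih _ _ _ _ _ ?_ ?_ ?_
        · intro key
          by_cases hk : key = (pvGetOr flip "sample_type", pvGetOr flip "condition_id")
          · subst hk
            rw [PySem.Dict.getD_insert_self]
            have h1 : pvLive us.1 exact = pvLive us.1 (byTC.getD (pvGetOr flip "sample_type", pvGetOr flip "condition_id") []) := by
              rw [← he]; exact pv_live_mono u us.1 hmono _
            rw [h1]
            exact pv_inv_mono u us.1 hmono _ _ (hTC _)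
          · rw [PySem.Dict.getD_insert_of_ne _ _ _ hk]
            exact pv_inv_mono u us.1 hmono _ _ (hTC _)
        · intro t
          by_cases hk : t = pvGetOr flip "sample_type"
          · subst hk
            rw [PySem.Dict.getD_insert_self]
            have h1 : pvLive us.1 relaxed = pvLive us.1 (byT.getD (pvGetOr flip "sample_type") []) := by
              rw [← hrl]; exact pv_live_mono u us.1 hmono _
            rw [h1]
            exact pv_inv_mono u us.1 hmono _ _ (hT _)
          · rw [PySem.Dict.getD_insert_of_ne _ _ _ hk]
            exact pv_inv_mono u us.1 hmono _ _ (hT _)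
        · exact pv_inv_mono u us.1 hmono _ _ hR
    · simp only [hE]
      set us := ((exact.take k).foldl (pvSelectStep flip) (u, s)) with hus
      have hmono : ∀ x, x ∈ (u : List String) → x ∈ (us.1 : List String) :=
        pv_used_fold_mono flip _ u s
      refine ih _ _ _ _ _ ?_ ?_ ?_
      · intro key
        by_cases hk : key = (pvGetOr flip "sample_type", pvGetOr flip "condition_id")
        · subst hk
          rw [PySem.Dict.getD_insert_self]
          have h1 : pvLive us.1 exact = pvLive us.1 (byTC.getD (pvGetOr flip "sample_type", pvGetOr flip "condition_id") []) := by
            rw [← he]; exact pv_live_mono u us.1 hmono _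
          rw [h1]
          exact pv_inv_mono u us.1 hmono _ _ (hTC _)
        · rw [PySem.Dict.getD_insert_of_ne _ _ _ hk]
          exact pv_inv_mono u us.1 hmono _ _ (hTC _)
      · intro t
        exact pv_inv_mono u us.1 hmono _ _ (hT _)
      · exact pv_inv_mono u us.1 hmono _ _ hR

-- ===== VERDICT (by name: the statement is the Claim_ definition above) =====
theorem pick_controls_py_spec : Claim_equal_pick_controls_py := by
  intro flip_rows control_rows controls_per_flip _hdom
  unfold Spec_pick_controls_py pick_controls_py pick_controls_py_alt
  simp only []
  have hidx :
      (List.foldl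
        (fun (p : PySem.Dict (String × String) (List (PySem.Dict String String)) ×
                  PySem.Dict String (List (PySem.Dict String String))) r =>
          (p.1.modify (pvKeyTC r) [] (· ++ [r]), p.2.modify (pvKeyT r) [] (· ++ [r])))
        (PySem.Dict.empty, PySem.Dict.empty) (control_rows.map PySem.Dict.ofList)) =
      ((control_rows.map PySem.Dict.ofList).foldl
         (fun d r => d.modify (pvKeyTC r) [] (· ++ [r])) PySem.Dict.empty,
       (control_rows.map PySem.Dict.ofList).foldl
         (fun d r => d.modify (pvKeyT r) [] (· ++ [r])) PySem.Dict.empty) :=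
    pv_pair_foldl
      (fun d r => d.modify (pvKeyTC r) [] (· ++ [r]))
      (fun d r => d.modify (pvKeyT r) [] (· ++ [r]))
      (control_rows.map PySem.Dict.ofList) PySem.Dict.empty PySem.Dict.empty
  simp only [hidx]
  have hmain := pv_main (control_rows.map PySem.Dict.ofList) (max controls_per_flip 0).toNat
      (flip_rows.map PySem.Dict.ofList)
      ((control_rows.map PySem.Dict.ofList).foldl
         (fun d r => d.modify (pvKeyTC r) [] (· ++ [r])) PySem.Dict.empty)
      ((control_rows.map PySem.Dict.ofList).foldl
         (fun d r => d.modify (pvKeyT r) [] (· ++ [r])) PySem.Dict.empty)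
      (control_rows.map PySem.Dict.ofList) PySem.Set.empty []
      (by
        intro key
        rw [pv_getD_groupFold]
        rw [show (PySem.Dict.empty : PySem.Dict (String × String) (List (PySem.Dict String String))).getD
              key [] = [] from rfl, List.nil_append])
      (by
        intro t
        rw [pv_getD_groupFold]
        rw [show (PySem.Dict.empty : PySem.Dict String (List (PySem.Dict String String))).getD
              t [] = [] from rfl, List.nil_append])
      rfl
  exact (congrArg Prod.snd hmain).symm
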